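-- pv_equiv track=rewrite | github.com/suhyeon7675/python_algorithm | 2023-05-08/가장 큰 수 찾기/8_학생.py | solution
-- ===== SOURCE A (Python) =====
-- def solution(array):
--     answer = []
--     num, j = 0, 0
--     for i in range(len(array)):
--         if array[i] >= num:
--              num = array[i]
--              j = i
--     answer.append(num)
--     answer.append(j)
--     return answer
-- ===== SOURCE B (Python) =====
-- def solution(array):
--     M = max([0, *array])
--     j = max((i for i, v in enumerate(array) if v == M), default=0)
--     return [M, j]
-- ===== Notes on version B (the rewrite author's own statement) =====
-- stated objective: idiomatic
-- what changed: A's single fused running-max loop (tracking value and index together) is replaced by a built-in max over [0,*array] for the value, plus a separate filtered search over enumerate(array) for the last index equal to it.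
import Mathlib
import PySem

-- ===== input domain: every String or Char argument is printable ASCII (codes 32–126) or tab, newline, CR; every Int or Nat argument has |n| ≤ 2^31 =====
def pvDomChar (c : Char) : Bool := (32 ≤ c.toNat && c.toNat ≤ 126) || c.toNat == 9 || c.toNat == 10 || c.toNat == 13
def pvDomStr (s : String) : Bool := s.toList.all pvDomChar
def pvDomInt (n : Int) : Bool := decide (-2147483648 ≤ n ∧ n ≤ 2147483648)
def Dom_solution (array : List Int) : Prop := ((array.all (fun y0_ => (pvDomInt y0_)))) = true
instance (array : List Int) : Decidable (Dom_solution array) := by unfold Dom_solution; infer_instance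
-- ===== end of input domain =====

-- B: A's fused running-max loop is replaced by a built-in max over 0::array plus a separate
-- filtered search for the last index equal to it (idiomatic decomposition; same O(n) cost).


-- ===== PORT A =====
-- for i in range(len(array)): if array[i] >= num: num, j = array[i], i   (index always in range, so pyGetD is exact)
def solution (array : List Int) : List Int :=
  let st := (PySem.List.pyRange 0 (array.length : Int) 1).foldl
    (fun (s : Int × Int) i =>
      if PySem.List.pyGetD array i 0 ≥ s.1 then (PySem.List.pyGetD array i 0, i) else s)
    ((0 : Int), (0 : Int))
  [st.1, st.2]

-- ===== PORT B =====
-- M = max([0, *array]); j = max((i for i, v in enumerate(array) if v == M), default=0)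
def solution_alt (array : List Int) : List Int :=
  let M := (PySem.List.max? ((0 : Int) :: array) (fun y => y)).getD 0
  let j := (PySem.List.max?
      ((PySem.List.enumerate array 0).filterMap (fun p => if p.2 = M then some p.1 else none))
      (fun y => y)).getD 0
  [M, j]

-- ===== PRECONDITION & SPEC =====
def Spec_solution (array : List Int) (out : List Int) : Prop := out = solution_alt array
instance (array : List Int) (out : List Int) : Decidable (Spec_solution array out) := by unfold Spec_solution; infer_instance

-- ===== CLAIM (what is proved, stated in full; the proofs are below) =====
def Claim_equal_solution : Prop := ∀ (array : List Int), Dom_solution array → Spec_solution array (solution array)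

-- ===== LEMMAS AND PROOFS =====

-- A's loop state as a fold over enumerate
def stateA (array : List Int) : Int × Int :=
  (PySem.List.enumerate array 0).foldl
    (fun (s : Int × Int) p => if p.2 ≥ s.1 then (p.2, p.1) else s) ((0 : Int), (0 : Int))

-- B's two components
def Mval (array : List Int) : Int := array.foldl max 0
def Jval (array : List Int) : Int :=
  (PySem.List.max?
      ((PySem.List.enumerate array 0).filterMap (fun p => if p.2 = Mval array then some p.1 else none))
      (fun y => y)).getD 0

lemma solution_eq_stateA (array : List Int) :
    solution array = [(stateA array).1, (stateA array).2] := by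
  unfold solution stateA
  rw [PySem.List.enumerate_eq_map_pyRange array (0 : Int), List.foldl_map]
  simp

lemma foldl_max_le (t : List Int) (a n : Int) (ha : a ≤ n) (h : ∀ y ∈ t, y ≤ n) :
    t.foldl max a ≤ n := by
  induction t generalizing a with
  | nil => simpa using ha
  | cons b t ih =>
      simp only [List.foldl_cons]
      exact ih (max a b) (max_le ha (h b (List.mem_cons_self ..))) fun y hy => h y (List.mem_cons_of_mem _ hy)

lemma maxD_append_last (l : List Int) (n : Int) (h : ∀ a ∈ l, a ≤ n) :
    (PySem.List.max? (l ++ [n]) (fun y => y)).getD 0 = n := by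
  cases l with
  | nil => simp [PySem.List.max?_id_cons]
  | cons a t =>
      have : ((a :: t) ++ [n] : List Int) = a :: (t ++ [n]) := by simp
      rw [this, PySem.List.max?_id_cons]
      simp only [List.foldl_append, List.foldl_cons, List.foldl_nil, Option.getD_some]
      exact max_eq_right (foldl_max_le t a n (h a (List.mem_cons_self ..))
        fun y hy => h y (List.mem_cons_of_mem _ hy))

lemma enumerate_fst_le (array : List Int) (p : Int × Int)
    (hp : p ∈ PySem.List.enumerate array 0) : p.1 ≤ (array.length : Int) := by
  rcases (PySem.List.mem_enumerate_iff _ _ _).1 hp with ⟨k, hk, rfl⟩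
  simp only [zero_add]
  exact_mod_cast Nat.le_of_lt hk

lemma Mval_append (ys : List Int) (x : Int) : Mval (ys ++ [x]) = max (Mval ys) x := by
  simp [Mval, List.foldl_append]

lemma stateA_eq (array : List Int) : stateA array = (Mval array, Jval array) := by
  induction array using List.reverseRecOn with
  | nil => simp [stateA, Mval, Jval, PySem.List.enumerate_nil, PySem.List.max?]
  | append_singleton ys x ih =>
      have hen : PySem.List.enumerate (ys ++ [x]) 0
          = PySem.List.enumerate ys 0 ++ [((ys.length : Int), x)] := by
        rw [PySem.List.enumerate_append]
        simp [PySem.List.enumerate_cons, PySem.List.enumerate_nil]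
      have hstep : stateA (ys ++ [x])
          = (if x ≥ Mval ys then (x, (ys.length : Int)) else (Mval ys, Jval ys)) := by
        unfold stateA
        rw [hen, List.foldl_append]
        have : (PySem.List.enumerate ys 0).foldl
            (fun (s : Int × Int) p => if p.2 ≥ s.1 then (p.2, p.1) else s) ((0 : Int), (0 : Int))
            = (Mval ys, Jval ys) := ih
        rw [this]
        simp
      rw [hstep]
      by_cases hx : x ≥ Mval ys
      · -- the new element becomes (or ties) the max; its index wins as the last one
        have hM : Mval (ys ++ [x]) = x := by rw [Mval_append]; exact max_eq_right hx
        have hJ : Jval (ys ++ [x]) = (ys.length : Int) := by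
          unfold Jval
          rw [hen, List.filterMap_append, hM]
          simp only [List.filterMap_cons, List.filterMap_nil]
          exact maxD_append_last _ _ (by
            intro a ha
            rcases List.mem_filterMap.1 ha with ⟨p, hp, hpa⟩
            have : a = p.1 := by
              by_cases h2 : p.2 = x <;> simp [h2] at hpa; omega
            exact this ▸ enumerate_fst_le ys p hp)
        rw [if_pos hx, hM, hJ]
      · -- the old max stays; the new element does not match it
        rw [not_le] at hx
        have hM : Mval (ys ++ [x]) = Mval ys := by rw [Mval_append]; exact max_eq_left (le_of_lt hx)
        have hJ : Jval (ys ++ [x]) = Jval ys := by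
          unfold Jval
          rw [hen, List.filterMap_append, hM]
          have : x ≠ Mval ys := ne_of_lt hx
          simp [this]
        rw [if_neg (not_le.2 hx), hM, hJ]

lemma solution_alt_eq (array : List Int) : solution_alt array = [Mval array, Jval array] := by
  unfold solution_alt Jval Mval
  rw [PySem.List.max?_id_cons]
  rfl

-- ===== VERDICT (by name: the statement is the Claim_ definition above) =====
theorem solution_spec : Claim_equal_solution := by
  intro array _
  unfold Spec_solution
  rw [solution_eq_stateA, stateA_eq, solution_alt_eq]
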